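-- pv_equiv track=rewrite | github.com/vslala/algorithms | src/main/java/com/bma/problemsolving/interviewbit/python/balance_array.py | solve
-- ===== SOURCE A (Python) =====
-- def solve(A):
--     pre = []
--     post = [0]*len(A)
--     val = 0
--     for index, value in enumerate(A):
--         if index % 2 == 0:
--             val  += value
--         else:
--             val -=  value
--         pre.append(val)
--
--     val  = 0
--     for index in range(len(A) - 1, -1, -1):
--         if index % 2 == 0:
--             val += A[index]
--         else:
--             val -= A[index]
--         post[index] = val
--
--     count = 0
--     for i in range(0, len(A)):
--         if pre[i] == post[i]:
--             count += 1
--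
--     return count
-- ===== SOURCE B (Python) =====
-- def solve(A):
--     # Total alternating sum T; then one forward pass: post[i] = T - pre[i-1],
--     # so pre[i] == post[i]  <=>  cur + prev == T.
--     T = 0
--     sign = 1
--     for v in A:
--         T += sign * v
--         sign = -sign
--     count = 0
--     prev = 0
--     cur = 0
--     sign = 1
--     for v in A:
--         prev, cur = cur, cur + sign * v
--         sign = -sign
--         if cur + prev == T:
--             count += 1
--     return count
-- ===== Notes on version B (the rewrite author's own statement) =====
-- stated objective: alternative
-- what changed: B replaces A's three passes and two auxiliary arrays (pre and post) by the identity post[i] = T - pre[i-1]: it computes the total alternating sum T once, then counts in a single forward pass maintaining only the current and previous prefix sums, using O(1) extra space instead of O(n).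
import Mathlib
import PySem

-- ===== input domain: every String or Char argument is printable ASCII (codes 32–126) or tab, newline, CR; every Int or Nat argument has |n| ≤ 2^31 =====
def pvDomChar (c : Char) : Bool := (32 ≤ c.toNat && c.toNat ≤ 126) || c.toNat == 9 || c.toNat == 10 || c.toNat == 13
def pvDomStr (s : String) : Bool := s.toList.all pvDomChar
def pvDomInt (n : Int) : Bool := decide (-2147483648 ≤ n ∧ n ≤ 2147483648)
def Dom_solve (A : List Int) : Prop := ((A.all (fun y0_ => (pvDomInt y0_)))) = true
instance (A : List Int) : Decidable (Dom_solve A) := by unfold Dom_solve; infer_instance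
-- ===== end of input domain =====

-- B replaces A's three passes and two auxiliary arrays by the identity post[i] = T - pre[i-1]:
-- one pass for the total alternating sum T, one counting pass with O(1) state (alternative decomposition).

-- ===== PORT A =====
-- pre[i]/post[i] reads in A's loops are always in range, so pyGetD with default 0 is exact here.
def solve (A : List Int) : Int :=
  let n : Int := (A.length : Int)
  let s1 := (PySem.List.enumerate A 0).foldl
      (fun (st : List Int × Int) iv =>
        let val := if PySem.Int.mod iv.1 2 == 0 then st.2 + iv.2 else st.2 - iv.2
        (st.1 ++ [val], val)) ([], 0)
  let pre := s1.1
  let s2 := (PySem.List.pyRange (n - 1) (-1) (-1)).foldl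
      (fun (st : List Int × Int) idx =>
        let val := if PySem.Int.mod idx 2 == 0 then st.2 + PySem.List.pyGetD A idx 0
                   else st.2 - PySem.List.pyGetD A idx 0
        (PySem.List.pySetD st.1 idx val, val)) (List.replicate A.length (0 : Int), 0)
  let post := s2.1
  (PySem.List.pyRange 0 n 1).foldl
      (fun count i =>
        if PySem.List.pyGetD pre i 0 == PySem.List.pyGetD post i 0 then count + 1 else count) 0

-- ===== PORT B =====
def solve_alt (A : List Int) : Int :=
  let T := (A.foldl (fun (s : Int × Int) v => (s.1 + s.2 * v, -s.2)) (0, 1)).1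
  (A.foldl (fun (s : Int × Int × Int × Int) v =>
      let prev := s.2.2.1
      let cur := s.2.2.1 + s.2.2.2 * v
      ((if cur + prev == T then s.1 + 1 else s.1), prev, cur, -s.2.2.2)) (0, 0, 0, 1)).1

-- ===== PRECONDITION & SPEC =====
def Spec_solve (A : List Int) (out : Int) : Prop := out = solve_alt A
instance (A : List Int) (out : Int) : Decidable (Spec_solve A out) := by unfold Spec_solve; infer_instance

-- ===== CLAIM (what is proved, stated in full; the proofs are below) =====
def Claim_equal_solve : Prop := ∀ (A : List Int), Dom_solve A → Spec_solve A (solve A)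

-- ===== LEMMAS AND PROOFS =====

-- the sign (-1)^k of index k
def sgnP (k : Nat) : Int := if k % 2 = 0 then 1 else -1

-- Q xs k m = alternating sum of the first m elements of xs, starting with parity k
def Q : List Int → Nat → Nat → Int
  | _, _, 0 => 0
  | [], _, _ => 0
  | x :: xs, k, Nat.succ m => sgnP k * x + Q xs (k + 1) m

@[simp] theorem Q_zero (xs : List Int) (k : Nat) : Q xs k 0 = 0 := by cases xs <;> rfl
@[simp] theorem Q_nil (k m : Nat) : Q [] k m = 0 := by cases m <;> rfl
@[simp] theorem Q_cons_succ (x : Int) (xs : List Int) (k m : Nat) :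
    Q (x :: xs) k (m + 1) = sgnP k * x + Q xs (k + 1) m := rfl

theorem sgnP_succ (k : Nat) : sgnP (k + 1) = -sgnP k := by
  rcases Nat.mod_two_eq_zero_or_one k with h | h <;> simp [sgnP, Nat.add_mod, h]

theorem Q_succ : ∀ (xs : List Int) (k m : Nat),
    Q xs k (m + 1) = Q xs k m + sgnP (k + m) * xs.getD m 0 := by
  intro xs
  induction xs with
  | nil => intro k m; simp
  | cons x xs ih =>
    intro k m
    cases m with
    | zero => simp
    | succ m =>
      rw [Q_cons_succ, ih (k + 1) m, Q_cons_succ, List.getD_cons_succ,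
        show k + 1 + m = k + (m + 1) by omega]
      ring

theorem if_mod_sgn (k : Nat) (v x : Int) :
    (if PySem.Int.mod (↑k : Int) 2 == 0 then v + x else v - x) = v + sgnP k * x := by
  have hm : PySem.Int.mod (↑k : Int) 2 = ((k % 2 : Nat) : Int) := PySem.Int.mod_natCast k 2
  rcases Nat.mod_two_eq_zero_or_one k with h | h <;>
    rw [hm, h] <;> simp [sgnP, h] <;> ring

theorem pre_fold : ∀ (xs : List Int) (k : Nat) (acc : List Int) (v : Int),
    (PySem.List.enumerate xs ↑k).foldl
      (fun (st : List Int × Int) iv =>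
        let val := if PySem.Int.mod iv.1 2 == 0 then st.2 + iv.2 else st.2 - iv.2
        (st.1 ++ [val], val)) (acc, v)
    = (acc ++ (List.range xs.length).map (fun i => v + Q xs k (i + 1)),
       v + Q xs k xs.length) := by
  intro xs
  induction xs with
  | nil => intro k acc v; simp [PySem.List.enumerate_nil]
  | cons x xs ih =>
    intro k acc v
    rw [PySem.List.enumerate_cons]
    simp only [List.foldl_cons]
    rw [if_mod_sgn k v x]
    have hc : (↑k : Int) + 1 = ↑(k + 1) := by push_cast; ring
    rw [hc, ih (k + 1) (acc ++ [v + sgnP k * x]) (v + sgnP k * x)]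
    simp only [Prod.mk.injEq]
    refine ⟨?_, ?_⟩
    · rw [List.length_cons, List.range_succ_eq_map, List.map_cons, List.map_map,
        List.append_assoc]
      congr 1
      rw [List.singleton_append]
      congr 1
      · simp
      · apply List.map_congr_left
        intro i _
        simp only [Function.comp_apply, Nat.succ_eq_add_one, Q_cons_succ]
        ring
    · rw [List.length_cons, Q_cons_succ]; ring

theorem post_fold (A : List Int) : ∀ (m : Nat), m ≤ A.length →
    ∀ (lst : List Int) (v : Int), lst.length = A.length →
    v = Q A 0 A.length - Q A 0 m →
    ((PySem.List.pyRange ((m : Int) - 1) (-1) (-1)).foldl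
      (fun (st : List Int × Int) idx =>
        (PySem.List.pySetD st.1 idx
            (if PySem.Int.mod idx 2 == 0 then st.2 + PySem.List.pyGetD A idx 0
             else st.2 - PySem.List.pyGetD A idx 0),
         if PySem.Int.mod idx 2 == 0 then st.2 + PySem.List.pyGetD A idx 0
         else st.2 - PySem.List.pyGetD A idx 0)) (lst, v)).1.length = A.length ∧
    ∀ i : Nat, i < A.length →
      PySem.List.pyGetD ((PySem.List.pyRange ((m : Int) - 1) (-1) (-1)).foldl
        (fun (st : List Int × Int) idx =>
          (PySem.List.pySetD st.1 idx
              (if PySem.Int.mod idx 2 == 0 then st.2 + PySem.List.pyGetD A idx 0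
               else st.2 - PySem.List.pyGetD A idx 0),
           if PySem.Int.mod idx 2 == 0 then st.2 + PySem.List.pyGetD A idx 0
           else st.2 - PySem.List.pyGetD A idx 0)) (lst, v)).1 ↑i 0
      = if i < m then Q A 0 A.length - Q A 0 i else PySem.List.pyGetD lst ↑i 0 := by
  intro m
  induction m with
  | zero =>
    intro _ lst v hlen _
    rw [show ((0 : Nat) : Int) - 1 = -1 by ring, PySem.List.pyRange_neg_one_eq_nil (by omega)]
    simp [hlen]
  | succ m ih =>
    intro hm lst v hlen hv
    rw [show ((m + 1 : Nat) : Int) - 1 = (m : Int) by push_cast; ring,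
      PySem.List.pyRange_neg_one_cons (by omega)]
    simp only [List.foldl_cons]
    rw [if_mod_sgn m v (PySem.List.pyGetD A ↑m 0)]
    have hg : PySem.List.pyGetD A (↑m : Int) 0 = A.getD m 0 := PySem.List.pyGetD_natCast A m 0
    have hv' : v + sgnP m * PySem.List.pyGetD A ↑m 0 = Q A 0 A.length - Q A 0 m := by
      rw [hg, hv, Q_succ A 0 m, Nat.zero_add]; ring
    have hlen' : (PySem.List.pySetD lst ↑m (v + sgnP m * PySem.List.pyGetD A ↑m 0)).length
        = A.length := by rw [PySem.List.length_pySetD, hlen]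
    obtain ⟨h1, h2⟩ := ih (by omega) _ _ hlen' hv'
    refine ⟨h1, ?_⟩
    intro i hi
    rw [h2 i hi]
    by_cases hcase : i < m
    · simp [hcase, Nat.lt_succ_of_lt hcase]
    · have hmw : m < lst.length := by omega
      rw [PySem.List.pyGetD_pySetD_natCast lst m i _ 0 hmw]
      by_cases hem : i = m
      · rw [if_neg hcase, if_pos hem, if_pos (by omega : i < m + 1), hem]
        exact hv'
      · have hns : ¬ i < m + 1 := by omega
        simp [hcase, hem, hns]

theorem T_fold : ∀ (xs : List Int) (k : Nat) (acc : Int),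
    xs.foldl (fun (s : Int × Int) v => (s.1 + s.2 * v, -s.2)) (acc, sgnP k)
    = (acc + Q xs k xs.length, sgnP (k + xs.length)) := by
  intro xs
  induction xs with
  | nil => intro k acc; simp
  | cons x xs ih =>
    intro k acc
    simp only [List.foldl_cons]
    rw [← sgnP_succ, ih (k + 1) (acc + sgnP k * x)]
    simp only [List.length_cons, Q_cons_succ, Prod.mk.injEq]
    refine ⟨by ring, ?_⟩
    rw [show k + 1 + xs.length = k + (xs.length + 1) by omega]

-- CntB T xs k v = matches counted by B's pass over suffix xs, entering with cur = v, parity k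
def CntB (T : Int) : List Int → Nat → Int → Nat
  | [], _, _ => 0
  | x :: xs, k, v =>
    (if (v + sgnP k * x) + v = T then 1 else 0) + CntB T xs (k + 1) (v + sgnP k * x)

theorem B_fold (T : Int) : ∀ (xs : List Int) (k : Nat) (c p v : Int),
    (xs.foldl (fun (s : Int × Int × Int × Int) x =>
        let prev := s.2.2.1
        let cur := s.2.2.1 + s.2.2.2 * x
        ((if cur + prev == T then s.1 + 1 else s.1), prev, cur, -s.2.2.2)) (c, p, v, sgnP k)).1
    = c + ↑(CntB T xs k v) := by
  intro xs
  induction xs with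
  | nil => intro k c p v; simp [CntB]
  | cons x xs ih =>
    intro k c p v
    simp only [List.foldl_cons]
    rw [← sgnP_succ, ih (k + 1)]
    simp only [CntB, beq_iff_eq]
    by_cases h : v + sgnP k * x + v = T <;> simp [h] <;> push_cast <;> ring

theorem Cnt_count (T : Int) : ∀ (xs : List Int) (k : Nat) (v : Int),
    CntB T xs k v
    = List.countP (fun m => decide (v + Q xs k (m + 1) + (v + Q xs k m) = T))
        (List.range xs.length) := by
  intro xs
  induction xs with
  | nil => intro k v; simp [CntB]
  | cons x xs ih =>
    intro k v
    simp only [CntB, List.length_cons, List.range_succ_eq_map, List.countP_cons,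
      List.countP_map, ih (k + 1) (v + sgnP k * x)]
    have hcount : List.countP
          (fun m => decide (v + sgnP k * x + Q xs (k+1) (m + 1) + (v + sgnP k * x + Q xs (k+1) m) = T))
          (List.range xs.length)
        = List.countP
          ((fun m => decide (v + Q (x :: xs) k (m + 1) + (v + Q (x :: xs) k m) = T)) ∘ Nat.succ)
          (List.range xs.length) := by
      apply List.countP_congr
      intro m _
      simp only [Function.comp_apply, Nat.succ_eq_add_one, Q_cons_succ]
      rw [show v + sgnP k * x + Q xs (k + 1) (m + 1) + (v + sgnP k * x + Q xs (k + 1) m)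
            = v + (sgnP k * x + Q xs (k + 1) (m + 1)) + (v + (sgnP k * x + Q xs (k + 1) m))
          from by ring]
      rfl
    have hp0 : (decide (v + Q (x :: xs) k (0 + 1) + (v + Q (x :: xs) k 0) = T))
        = (decide (v + sgnP k * x + v = T) : Bool) := by
      simp only [decide_eq_decide, Q_cons_succ, Q_zero]
      constructor <;> intro h <;> linarith
    rw [hcount, hp0]
    by_cases h : v + sgnP k * x + v = T <;> simp [h] <;> omega

theorem count_loop (preL postL : List Int) (n : Nat) :
    (PySem.List.pyRange 0 (n : Int) 1).foldl
      (fun (count : Int) i =>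
        if PySem.List.pyGetD preL i 0 == PySem.List.pyGetD postL i 0 then count + 1 else count) 0
    = ((List.countP (fun k : Nat => PySem.List.pyGetD preL ↑k 0 == PySem.List.pyGetD postL ↑k 0)
        (List.range n) : Nat) : Int) := by
  rw [PySem.List.pyRange_zero_natCast]
  simp only [List.foldl_map]
  have h := PySem.List.foldl_count_if
    (fun k : Nat => PySem.List.pyGetD preL ↑k 0 == PySem.List.pyGetD postL ↑k 0)
    (List.range n) 0
  rw [zero_add] at h
  exact h

theorem sgnP_zero : sgnP 0 = 1 := by norm_num [sgnP]

theorem solveA_eq (A : List Int) :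
    solve A = ↑(List.countP (fun m =>
        decide (Q A 0 (m + 1) = Q A 0 A.length - Q A 0 m)) (List.range A.length)) := by
  have h1 := pre_fold A 0 [] 0
  rw [Nat.cast_zero] at h1
  simp only [List.nil_append, zero_add] at h1
  obtain ⟨hlen2, hpt⟩ := post_fold A A.length le_rfl (List.replicate A.length 0) 0
      (by simp) (by simp)
  unfold solve
  simp only [h1]
  refine Eq.trans (count_loop _ _ A.length) ?_
  congr 1
  apply List.countP_congr
  intro m hm
  have hmn : m < A.length := List.mem_range.mp hm
  rw [hpt m hmn, if_pos hmn, PySem.List.pyGetD_natCast, PySem.List.getD_map_range _ _ _ _ hmn]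
  by_cases h : Q A 0 (m + 1) = Q A 0 A.length - Q A 0 m <;> simp [h]

theorem solveB_eq (A : List Int) :
    solve_alt A = ↑(CntB (Q A 0 A.length) A 0 0) := by
  have h1 := T_fold A 0 0
  rw [sgnP_zero] at h1
  simp only [Nat.zero_add, zero_add] at h1
  have h2 := B_fold (Q A 0 A.length) A 0 0 0 0
  rw [sgnP_zero] at h2
  simp only [zero_add] at h2
  unfold solve_alt
  simp only [h1]
  exact h2

-- ===== VERDICT (by name: the statement is the Claim_ definition above) =====
theorem solve_spec : Claim_equal_solve := by
  unfold Claim_equal_solve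
  intro A _
  unfold Spec_solve
  rw [solveA_eq, solveB_eq, Cnt_count]
  congr 1
  apply List.countP_congr
  intro m _
  simp only [zero_add, decide_eq_true_eq]
  constructor <;> intro h <;> linarith
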